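-- pv_equiv track=rewrite | github.com/metjoeblack/ds_algos | dynamic_programming.py | make_changes
-- ===== SOURCE A (Python) =====
-- from functools import lru_cache
--
-- def make_changes(changes, coins):
--
--     @lru_cache(maxsize=None)
--     def _helper(changes):
--         if changes == 0:
--             return [[]]
--         if changes < 0:
--             return None
--         result = []
--         for coin in coins:
--             ret = _helper(changes - coin)
--             if ret is not None:
--                 result += [sub + [coin] for sub in ret]
--         return result
--     return _helper(changes)
-- ===== SOURCE B (Python) =====
-- def make_changes(changes, coins):
--     if changes < 0:
--         return None
--     dp = [[[]]]  # dp[i] = all ordered coin sequences summing to i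
--     for i in range(1, changes + 1):
--         row = []
--         for coin in coins:
--             if 0 < coin <= i:
--                 row += [s + [coin] for s in dp[i - coin]]
--         dp.append(row)
--     return dp[changes]
-- ===== Notes on version B (the rewrite author's own statement) =====
-- stated objective: alternative
-- what changed: Replaces A's lru_cache-memoized top-down recursion with an explicit bottom-up table dp[0..changes], where dp[i] is built by extending dp[i-coin] for each coin in order.
import Mathlib
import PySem

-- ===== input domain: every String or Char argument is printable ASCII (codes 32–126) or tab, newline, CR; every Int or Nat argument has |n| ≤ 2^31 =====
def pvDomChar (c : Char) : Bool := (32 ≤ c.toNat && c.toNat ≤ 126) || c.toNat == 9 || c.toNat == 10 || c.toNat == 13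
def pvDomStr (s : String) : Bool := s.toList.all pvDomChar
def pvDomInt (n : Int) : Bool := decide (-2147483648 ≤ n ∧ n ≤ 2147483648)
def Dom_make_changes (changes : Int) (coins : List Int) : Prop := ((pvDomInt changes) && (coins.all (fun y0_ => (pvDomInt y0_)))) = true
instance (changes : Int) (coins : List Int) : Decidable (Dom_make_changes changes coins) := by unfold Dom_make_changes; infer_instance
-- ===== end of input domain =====

-- B replaces A's memoized top-down recursion by an explicit bottom-up table dp[0..changes]
-- (equal output on Pre_; where A would recurse forever on a coin ≤ 0, B skips that coin).

-- ===== PORT A =====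
-- A's inner `_helper` is a recursion on `changes`; the fuel parameter only makes it total
-- in Lean (inside Pre_ the fuel `changes.toNat + 1` is never exhausted); lru_cache is a
-- value-transparent memoization and is not modelled.
def mcA_helper (coins : List Int) : Nat → Int → Option (List (List Int))
  | 0, _ => none
  | fuel + 1, changes =>
    if changes = 0 then some [[]]
    else if changes < 0 then none
    else
      some (coins.foldl (fun result coin =>
        match mcA_helper coins fuel (changes - coin) with
        | none => result
        | some ret => result ++ ret.map (fun sub => sub ++ [coin])) [])

def make_changes (changes : Int) (coins : List Int) : Option (List (List Int)) :=
  mcA_helper coins (changes.toNat + 1) changes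

-- ===== PORT B =====
-- one row of the table: all sequences summing to i, from the rows dp[0..i-1]
def mcB_row (coins : List Int) (dp : List (List (List Int))) (i : Int) : List (List Int) :=
  coins.foldl (fun row coin =>
    if 0 < coin ∧ coin ≤ i then
      row ++ ((dp.getD (i - coin).toNat []).map (fun s => s ++ [coin]))
    else row) []

def make_changes_alt (changes : Int) (coins : List Int) : Option (List (List Int)) :=
  if changes < 0 then none
  else
    some (((PySem.List.pyRange 1 (changes + 1) 1).foldl
      (fun dp i => dp ++ [mcB_row coins dp i]) [[[]]]).getD changes.toNat [])

-- ===== PRECONDITION & SPEC =====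
-- Pre_ excludes exactly the inputs where A's recursion never terminates (RecursionError):
-- a positive amount together with some coin ≤ 0.
def Pre_make_changes (changes : Int) (coins : List Int) : Prop :=
  0 < changes → ∀ c ∈ coins, 0 < c
instance (changes : Int) (coins : List Int) : Decidable (Pre_make_changes changes coins) := by
  unfold Pre_make_changes; infer_instance

def pvWitness_make_changes : Int × List Int := (5, [1, 2])

def Spec_make_changes (changes : Int) (coins : List Int) (out : Option (List (List Int))) : Prop := out = make_changes_alt changes coins
instance (changes : Int) (coins : List Int) (out : Option (List (List Int))) : Decidable (Spec_make_changes changes coins out) := by unfold Spec_make_changes; infer_instance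

-- ===== CLAIM (what is proved, stated in full; the proofs are below) =====
def Claim_equal_make_changes : Prop := ∀ (changes : Int) (coins : List Int), Dom_make_changes changes coins → Pre_make_changes changes coins → Spec_make_changes changes coins (make_changes changes coins)


-- ===== LEMMAS AND PROOFS =====

-- the value A computes at a nonnegative amount n
def Aval (coins : List Int) (n : Nat) : List (List Int) :=
  (mcA_helper coins (n + 1) (n : Int)).getD []

-- definitional unfolding of the helper at positive fuel
lemma mcA_helper_succ (coins : List Int) (fuel : Nat) (changes : Int) :
    mcA_helper coins (fuel + 1) changes =
      if changes = 0 then some [[]]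
      else if changes < 0 then none
      else
        some (coins.foldl (fun result coin =>
          match mcA_helper coins fuel (changes - coin) with
          | none => result
          | some ret => result ++ ret.map (fun sub => sub ++ [coin])) []) := rfl

-- With all coins positive, the helper's value does not depend on the fuel once it exceeds changes.toNat.
lemma mcA_helper_fuel (coins : List Int) (hpos : ∀ c ∈ coins, 0 < c) :
    ∀ f1 f2 : Nat, ∀ c : Int, c.toNat < f1 → c.toNat < f2 →
      mcA_helper coins f1 c = mcA_helper coins f2 c := by
  intro f1
  induction f1 with
  | zero => intro f2 c h1 _; omega
  | succ m ih =>
    intro f2 c h1 h2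
    match f2, h2 with
    | m' + 1, h2 =>
      rw [mcA_helper_succ, mcA_helper_succ]
      by_cases hc0 : c = 0
      · simp [hc0]
      by_cases hcneg : c < 0
      · simp [hc0, hcneg]
      · rw [if_neg hc0, if_neg hcneg, if_neg hc0, if_neg hcneg]
        congr 1
        refine PySem.List.foldl_congr_mem _ _ _ _ (fun acc coin hmem => ?_)
        have hco : 0 < coin := hpos coin hmem
        rw [ih m' (c - coin) (by omega) (by omega)]

-- For nonnegative changes the helper returns `some`.
lemma mcA_helper_some (coins : List Int) (f : Nat) (c : Int) (hc : 0 ≤ c) :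
    ∃ l, mcA_helper coins (f + 1) c = some l := by
  rw [mcA_helper_succ]
  split_ifs with h1 h2
  · exact ⟨_, rfl⟩
  · omega
  · exact ⟨_, rfl⟩

lemma mcB_row_eq (coins : List Int) (hpos : ∀ c ∈ coins, 0 < c) (k : Nat) :
    mcB_row coins ((List.range (k + 1)).map (Aval coins)) ((k : Int) + 1)
      = Aval coins (k + 1) := by
  have hk1 : ((k : Int) + 1) ≠ 0 := by omega
  have hk2 : ¬ ((k : Int) + 1) < 0 := by omega
  show _ = (mcA_helper coins (k + 1 + 1) ((k : Int) + 1)).getD []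
  rw [mcA_helper_succ, if_neg hk1, if_neg hk2, Option.getD_some, mcB_row]
  refine PySem.List.foldl_congr_mem _ _ _ _ (fun row coin hmem => ?_)
  have hco : 0 < coin := hpos coin hmem
  by_cases hle : coin ≤ (k : Int) + 1
  · rw [if_pos ⟨hco, hle⟩]
    set j : Nat := ((k : Int) + 1 - coin).toNat with hj
    have hjk : j ≤ k := by omega
    have hjc : (k : Int) + 1 - coin = (j : Int) := by omega
    obtain ⟨l, hl⟩ := mcA_helper_some coins j (j : Int) (by omega)
    have hfuel : mcA_helper coins (k + 1) ((k : Int) + 1 - coin) = some l := by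
      rw [hjc, mcA_helper_fuel coins hpos (k + 1) (j + 1) (j : Int) (by omega) (by omega), hl]
    rw [hfuel]
    have hdp : (((List.range (k + 1)).map (Aval coins)).getD j []) = Aval coins j := by
      rw [List.getD_eq_getElem?_getD]
      simp [Nat.lt_succ_of_le hjk]
    rw [hdp]
    have hAl : Aval coins j = l := by simp [Aval, hl]
    rw [hAl]
  · have hneg : (k : Int) + 1 - coin < 0 := by omega
    have hnone : mcA_helper coins (k + 1) ((k : Int) + 1 - coin) = none := by
      rw [mcA_helper_succ coins k, if_neg (by omega : ¬ (k : Int) + 1 - coin = 0), if_pos hneg]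
    rw [hnone, if_neg (by tauto)]

lemma dp_invariant (coins : List Int) (hpos : ∀ c ∈ coins, 0 < c) (n : Nat) :
    (PySem.List.pyRange 1 ((n : Int) + 1) 1).foldl
        (fun dp i => dp ++ [mcB_row coins dp i]) [[[]]]
      = (List.range (n + 1)).map (Aval coins) := by
  induction n with
  | zero =>
    rw [PySem.List.pyRange_one_eq_nil (by omega)]
    rw [List.range_one]
    simp only [List.map_cons, List.map_nil, List.foldl_nil]
    rw [show Aval coins 0 = [[]] from rfl]
  | succ k ih =>
    have hsplit : PySem.List.pyRange 1 ((((k : Nat) + 1 : Nat) : Int) + 1) 1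
        = PySem.List.pyRange 1 ((k : Int) + 1) 1 ++ [(k : Int) + 1] := by
      push_cast
      rw [← PySem.List.pyRange_one_succ_right (by omega)]
    rw [hsplit, List.foldl_append, ih]
    simp only [List.foldl_cons, List.foldl_nil]
    rw [mcB_row_eq coins hpos k]
    simp [List.range_succ]

-- ===== VERDICT (by name: the statement is the Claim_ definition above) =====
theorem make_changes_spec : Claim_equal_make_changes := by
  intro changes coins _ hpre
  unfold Spec_make_changes make_changes make_changes_alt
  by_cases hneg : changes < 0
  · rw [if_pos hneg, show changes.toNat = 0 from by omega, mcA_helper_succ,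
      if_neg (by omega : ¬ changes = 0), if_pos hneg]
  · rw [if_neg hneg]
    by_cases h0 : changes = 0
    · subst h0
      rw [PySem.List.pyRange_one_eq_nil (by omega)]
      rw [show (0 : Int).toNat = 0 from rfl, mcA_helper_succ]
      simp
    · have hcpos : 0 < changes := by omega
      have hpos := hpre hcpos
      have hcn : changes = ((changes.toNat : Nat) : Int) := by omega
      set n := changes.toNat with hn
      rw [hcn, dp_invariant coins hpos n]
      obtain ⟨l, hl⟩ := mcA_helper_some coins n ((n : Nat) : Int) (by omega)
      rw [hl]
      have hdp : ((List.range (n + 1)).map (Aval coins)).getD n [] = Aval coins n := by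
        rw [List.getD_eq_getElem?_getD]
        simp
      rw [hdp, Aval, hl]
      rfl
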